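-- pv_equiv track=rewrite | github.com/SeattleChris/ks-algorithm | even_dig.py | decide_up_down
-- ===== SOURCE A (Python) =====
-- def decide_up_down(i, digits):
--     """ INPUT: digits is full array of the digits of the num we are solving
--         INPUT: i is an interator for the position in digits array we are evealuating.
--         This function is ONLY called if digits[i] is odd.
--         OUTPUT: 2-tuple of bool if going up or down will get us to even.
--         If we go up we only need to get to _00, but going down will require moving
--         past the change of number of digits down to _88 before they are all even.
--         Therefore, we need to test against being above or below 44 for next 2 digits.
--     """
--     if not digits[i] % 2:
--         raise ValueError('Called decide_up_down on an even digit')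
--     if len(digits) - 1 < i + 2:  # We don't have 2 more digits
--         if len(digits) - 1 < i + 1:  # We don't have 1 more digit
--             return (False, False)
--             # return (True, True) if digits[i] % 2 else (False, False)
--         go_up = True if digits[i + 1] > 4 else False
--         go_down = True if digits[i + 1] < 6 else False
--         return (go_up, go_down)
--     # we have at least two more digits after our current position.
--     test = digits[i + 1] * 10 + digits[i + 2]
--     if test == 44:
--         i += 2
--         while not digits[i] % 2:
--             i += 1
--             # Return either direction works if we've exhausted all digits
--             if i == len(digits):
--                 return (True, True)
--         # i is now at next odd digit
--         return decide_up_down(i, digits)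
--     go_up = True if test > 44 else False
--     go_down = True if test < 44 else False
--     return (go_up, go_down)
-- ===== SOURCE B (Python) =====
-- def decide_up_down(i, digits):
--     """Iterative re-implementation: one explicit loop over the inspected
--     position j (= position after the current odd digit) instead of
--     tail recursion on the odd-digit position."""
--     if digits[i] % 2 == 0:
--         raise ValueError('Called decide_up_down on an even digit')
--     n = len(digits)
--     j = i + 1
--     while True:
--         if j > n - 1:
--             return (False, False)
--         if j == n - 1:
--             return (digits[j] > 4, digits[j] < 6)
--         test = digits[j] * 10 + digits[j + 1]
--         if test != 44:
--             return (test > 44, test < 44)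
--         j += 1
--         while j < n and digits[j] % 2 == 0:
--             j += 1
--         if j == n:
--             return (True, True)
--         j += 1
-- ===== Notes on version B (the rewrite author's own statement) =====
-- stated objective: simpler
-- what changed: Replaces A's tail recursion on the current odd-digit position (re-entering the function and its guard after every 44-run) with a single explicit while-loop over the inspected position j = i + 1, so the short-input checks, the 44 test and the even-run skip become one flat loop body with no function-call chain.
import Mathlib
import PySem

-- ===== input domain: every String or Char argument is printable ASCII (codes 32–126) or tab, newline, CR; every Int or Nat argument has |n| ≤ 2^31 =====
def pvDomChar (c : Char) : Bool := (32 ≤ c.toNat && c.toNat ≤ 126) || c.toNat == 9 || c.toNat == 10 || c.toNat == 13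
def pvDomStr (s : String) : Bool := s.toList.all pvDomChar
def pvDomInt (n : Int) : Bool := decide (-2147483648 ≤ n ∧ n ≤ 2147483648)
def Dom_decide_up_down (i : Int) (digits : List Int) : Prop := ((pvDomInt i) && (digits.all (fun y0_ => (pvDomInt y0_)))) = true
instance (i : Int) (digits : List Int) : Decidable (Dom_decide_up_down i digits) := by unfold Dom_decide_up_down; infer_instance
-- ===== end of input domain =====

-- B rewrites A's tail recursion on the odd-digit position as one explicit loop over the
-- inspected position j = i + 1 (objective: simpler/iterative decomposition, same cost).
-- Both ports use a fuel argument only to make the same computation total (2*len+1 steps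
-- always suffice: the position strictly increases and stays within the list on Pre_).

-- ===== PORT A =====
-- A's inner `while not digits[i] % 2: i += 1; if i == len(digits): return (True, True)`:
-- none = the `(True, True)` exhaustion exit, some j = loop left at the next odd position j.
-- An out-of-range digits[i] would be an IndexError in Python (outside Pre_); getD 1 (odd) exits there.
def pvScanA (digits : List Int) : Nat → Int → Option Int
  | 0, j => some j
  | fuel + 1, j =>
    if PySem.Int.mod ((PySem.List.pyGet? digits j).getD 1) 2 = 0 then
      if j + 1 = (digits.length : Int) then none
      else pvScanA digits fuel (j + 1)
    else some j

-- A's body: guard, short-input branches, the 44 test, and the tail-recursive call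
def pvGoA (digits : List Int) : Nat → Int → Bool × Bool
  | 0, _ => (false, false)
  | fuel + 1, i =>
    if PySem.Int.mod ((PySem.List.pyGet? digits i).getD 1) 2 = 0 then
      (false, false)  -- Python raises ValueError here (IndexError when out of range): outside Pre_
    else if (digits.length : Int) - 1 < i + 2 then
      if (digits.length : Int) - 1 < i + 1 then (false, false)
      else ((decide ((PySem.List.pyGet? digits (i + 1)).getD 0 > 4)),
            (decide ((PySem.List.pyGet? digits (i + 1)).getD 0 < 6)))
    else
      if (PySem.List.pyGet? digits (i + 1)).getD 0 * 10 + (PySem.List.pyGet? digits (i + 2)).getD 0 = 44 then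
        match pvScanA digits (2 * digits.length + 1) (i + 2) with
        | none => (true, true)
        | some j => pvGoA digits fuel j
      else ((decide ((PySem.List.pyGet? digits (i + 1)).getD 0 * 10 + (PySem.List.pyGet? digits (i + 2)).getD 0 > 44)),
            (decide ((PySem.List.pyGet? digits (i + 1)).getD 0 * 10 + (PySem.List.pyGet? digits (i + 2)).getD 0 < 44)))

def decide_up_down (i : Int) (digits : List Int) : Bool × Bool :=
  pvGoA digits (2 * digits.length + 1) i

-- ===== PORT B =====
-- B's inner `while j < n and digits[j] % 2 == 0: j += 1` (out-of-range access is outside Pre_; getD 1 exits)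
def pvSkipEven (digits : List Int) (n : Int) : Nat → Int → Int
  | 0, j => j
  | fuel + 1, j =>
    if j < n ∧ PySem.Int.mod ((PySem.List.pyGet? digits j).getD 1) 2 = 0 then
      pvSkipEven digits n fuel (j + 1)
    else j

-- B's outer `while True:` loop, with j the inspected position
def pvDecideLoop (digits : List Int) (n : Int) : Nat → Int → Bool × Bool
  | 0, _ => (false, false)
  | fuel + 1, j =>
    if j > n - 1 then (false, false)
    else if j = n - 1 then
      ((decide ((PySem.List.pyGet? digits j).getD 0 > 4)),
       (decide ((PySem.List.pyGet? digits j).getD 0 < 6)))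
    else
      if (PySem.List.pyGet? digits j).getD 0 * 10 + (PySem.List.pyGet? digits (j + 1)).getD 0 ≠ 44 then
        ((decide ((PySem.List.pyGet? digits j).getD 0 * 10 + (PySem.List.pyGet? digits (j + 1)).getD 0 > 44)),
         (decide ((PySem.List.pyGet? digits j).getD 0 * 10 + (PySem.List.pyGet? digits (j + 1)).getD 0 < 44)))
      else
        if pvSkipEven digits n (2 * digits.length + 1) (j + 1) = n then (true, true)
        else pvDecideLoop digits n fuel (pvSkipEven digits n (2 * digits.length + 1) (j + 1) + 1)

def decide_up_down_alt (i : Int) (digits : List Int) : Bool × Bool :=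
  if PySem.Int.mod ((PySem.List.pyGet? digits i).getD 1) 2 = 0 then
    (false, false)  -- ValueError (or IndexError) in Python: outside Pre_
  else pvDecideLoop digits (digits.length : Int) (2 * digits.length + 1) (i + 1)

-- ===== PRECONDITION & SPEC =====
-- Pre_: digits[i] exists (Python indexing, negative i counts from the end) and is odd —
-- exactly the inputs on which A returns (elsewhere A raises ValueError or IndexError).
def Pre_decide_up_down (i : Int) (digits : List Int) : Prop :=
  PySem.Int.mod ((PySem.List.pyGet? digits i).getD 0) 2 = 1
instance (i : Int) (digits : List Int) : Decidable (Pre_decide_up_down i digits) := by unfold Pre_decide_up_down; infer_instance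
def pvWitness_decide_up_down : Int × List Int := (0, [3])

def Spec_decide_up_down (i : Int) (digits : List Int) (out : Bool × Bool) : Prop := out = decide_up_down_alt i digits
instance (i : Int) (digits : List Int) (out : Bool × Bool) : Decidable (Spec_decide_up_down i digits out) := by unfold Spec_decide_up_down; infer_instance

-- ===== CLAIM (what is proved, stated in full; the proofs are below) =====
def Claim_equal_decide_up_down : Prop := ∀ (i : Int) (digits : List Int), Dom_decide_up_down i digits → Pre_decide_up_down i digits → Spec_decide_up_down i digits (decide_up_down i digits)

-- ===== LEMMAS AND PROOFS =====
theorem pvSkipEven_stop (digits : List Int) (n : Int) (f : Nat) (j : Int) (h : ¬ j < n) :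
    pvSkipEven digits n f j = j := by
  cases f with
  | zero => rfl
  | succ f => rw [pvSkipEven, if_neg (fun hc => h hc.1)]

theorem pvSkipEven_ge (digits : List Int) (n : Int) (f : Nat) :
    ∀ j : Int, j ≤ pvSkipEven digits n f j := by
  induction f with
  | zero => intro j; simp [pvSkipEven]
  | succ f ih =>
    intro j
    rw [pvSkipEven]
    split
    · have := ih (j + 1); omega
    · omega

theorem pvSkipEven_le (digits : List Int) (n : Int) (f : Nat) :
    ∀ j : Int, j ≤ n → pvSkipEven digits n f j ≤ n := by
  induction f with
  | zero => intro j h; simpa [pvSkipEven] using h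
  | succ f ih =>
    intro j h
    rw [pvSkipEven]
    split
    · rename_i hc; exact ih (j + 1) (by omega)
    · exact h

theorem pvSkipEven_exit (digits : List Int) (n : Int) (f : Nat) :
    ∀ j : Int, (n - j).toNat < f → pvSkipEven digits n f j < n →
    PySem.Int.mod ((PySem.List.pyGet? digits (pvSkipEven digits n f j)).getD 1) 2 ≠ 0 := by
  induction f with
  | zero => intro j hf; omega
  | succ f ih =>
    intro j hf
    rw [pvSkipEven]
    split
    · rename_i hc; exact ih (j + 1) (by omega)
    · rename_i hc
      intro hlt hev
      exact hc ⟨hlt, hev⟩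

-- A's inner scan and B's inner skip agree (inside the list, with sufficient fuel)
theorem pvScan_skip (digits : List Int) (fa : Nat) :
    ∀ (fb : Nat) (k : Int), ((digits.length : Int) - k).toNat < fa → ((digits.length : Int) - k).toNat < fb →
    -(digits.length : Int) ≤ k → k < (digits.length : Int) →
    pvScanA digits fa k =
      (if pvSkipEven digits (digits.length : Int) fb k = (digits.length : Int) then none
       else some (pvSkipEven digits (digits.length : Int) fb k)) := by
  induction fa with
  | zero => intro fb k hfa; omega
  | succ fa ih =>
    intro fb k hfa hfb h1 h2
    cases fb with
    | zero => omega
    | succ fb =>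
      rw [pvScanA]
      by_cases he : PySem.Int.mod ((PySem.List.pyGet? digits k).getD 1) 2 = 0
      · have hskip : pvSkipEven digits (digits.length : Int) (fb + 1) k
            = pvSkipEven digits (digits.length : Int) fb (k + 1) := by
          rw [pvSkipEven, if_pos (And.intro h2 he)]
        rw [if_pos he, hskip]
        by_cases hend : k + 1 = (digits.length : Int)
        · rw [if_pos hend, pvSkipEven_stop digits _ fb (k + 1) (by omega), if_pos hend]
        · rw [if_neg hend]
          exact ih fb (k + 1) (by omega) (by omega) (by omega) (by omega)
      · have hskip : pvSkipEven digits (digits.length : Int) (fb + 1) k = k := by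
          rw [pvSkipEven, if_neg (fun hc => he hc.2)]
        rw [if_neg he, hskip, if_neg (show ¬ k = (digits.length : Int) by omega)]

-- main correspondence: A at odd position i equals B's loop started at j = i + 1
theorem pv_key (digits : List Int) (fa : Nat) :
    ∀ (fb : Nat) (i : Int), ((digits.length : Int) - i).toNat < fa → ((digits.length : Int) - i).toNat < fb →
    -(digits.length : Int) ≤ i → i < (digits.length : Int) →
    PySem.Int.mod ((PySem.List.pyGet? digits i).getD 1) 2 ≠ 0 →
    pvGoA digits fa i = pvDecideLoop digits (digits.length : Int) fb (i + 1) := by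
  induction fa with
  | zero => intro fb i hfa; omega
  | succ fa ih =>
    intro fb i hfa hfb h1 h2 hodd
    cases fb with
    | zero => omega
    | succ fb =>
      have h12 : i + 1 + 1 = i + 2 := by ring
      rw [pvGoA, pvDecideLoop, if_neg hodd, h12]
      by_cases hc1 : (digits.length : Int) - 1 < i + 1
      · rw [if_pos (show (digits.length : Int) - 1 < i + 2 by omega), if_pos hc1,
            if_pos (show i + 1 > (digits.length : Int) - 1 by omega)]
      · by_cases hc2 : (digits.length : Int) - 1 < i + 2
        · rw [if_pos hc2, if_neg hc1, if_neg (show ¬ i + 1 > (digits.length : Int) - 1 by omega),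
              if_pos (show i + 1 = (digits.length : Int) - 1 by omega)]
        · rw [if_neg hc2, if_neg (show ¬ i + 1 > (digits.length : Int) - 1 by omega),
              if_neg (show ¬ i + 1 = (digits.length : Int) - 1 by omega)]
          by_cases ht : (PySem.List.pyGet? digits (i + 1)).getD 0 * 10 + (PySem.List.pyGet? digits (i + 2)).getD 0 = 44
          · rw [if_pos ht, if_neg (not_not_intro ht)]
            have hlen : ((digits.length : Int) - (i + 2)).toNat < 2 * digits.length + 1 := by omega
            have hsc := pvScan_skip digits (2 * digits.length + 1) (2 * digits.length + 1) (i + 2)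
              hlen hlen (by omega) (by omega)
            set j' := pvSkipEven digits (digits.length : Int) (2 * digits.length + 1) (i + 2) with hj'
            have hge : i + 2 ≤ j' := pvSkipEven_ge digits _ _ _
            have hle : j' ≤ (digits.length : Int) := pvSkipEven_le digits _ _ _ (by omega)
            by_cases hend : j' = (digits.length : Int)
            · rw [if_pos hend]
              split
              · rfl
              · rename_i j hj
                rw [hsc, if_pos hend] at hj
                exact absurd hj (by simp)
            · rw [if_neg hend]
              have hoddj : PySem.Int.mod ((PySem.List.pyGet? digits j').getD 1) 2 ≠ 0 := by
                rw [hj']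
                exact pvSkipEven_exit digits _ _ (i + 2) hlen (by omega)
              split
              · rename_i hj
                rw [hsc, if_neg hend] at hj
                exact absurd hj (by simp)
              · rename_i j hj
                rw [hsc, if_neg hend] at hj
                injection hj with hjj
                subst hjj
                exact ih fb j' (by omega) (by omega) (by omega) (by omega) hoddj
          · rw [if_neg ht, if_pos ht]

-- ===== VERDICT (by name: the statement is the Claim_ definition above) =====
theorem decide_up_down_spec : Claim_equal_decide_up_down := by
  intro i digits _hdom hpre
  unfold Spec_decide_up_down
  unfold Pre_decide_up_down at hpre
  obtain ⟨v, hv, hvodd⟩ : ∃ v, PySem.List.pyGet? digits i = some v ∧ PySem.Int.mod v 2 = 1 := by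
    cases h : PySem.List.pyGet? digits i with
    | none => rw [h] at hpre; exact absurd hpre (by decide)
    | some v => exact ⟨v, rfl, by rw [h] at hpre; simpa using hpre⟩
  have hodd : PySem.Int.mod ((PySem.List.pyGet? digits i).getD 1) 2 ≠ 0 := by
    rw [hv]; simp only [Option.getD_some]; omega
  have hn : PySem.List.pyGet? digits i ≠ none := by rw [hv]; simp
  rw [Ne, PySem.List.pyGet?_eq_none_iff, not_not] at hn
  unfold PySem.Raise.InRange at hn
  rw [decide_up_down, decide_up_down_alt, if_neg hodd]
  exact pv_key digits (2 * digits.length + 1) (2 * digits.length + 1) i (by omega) (by omega)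
    (by omega) (by omega) hodd
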